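-- pv_equiv track=rewrite | github.com/bozzfozz/soulspot | src/soulspot/domain/entities/error_codes.py | normalize_error_code
-- ===== SOURCE A (Python) =====
-- from enum import StrEnum
--
-- class DownloadErrorCode(StrEnum):
--     """Standardized error codes for download failures.
--
--     Hey future me - StrEnum means values ARE strings!
--     So DownloadErrorCode.TIMEOUT == "timeout" (True)
--     This makes DB storage and comparison easy.
--     """
--
--     # Non-retryable errors (permanent failures)
--     FILE_NOT_FOUND = "file_not_found"
--     USER_BLOCKED = "user_blocked"
--     INVALID_FILE = "invalid_file"
--     FILE_TOO_SMALL = "file_too_small"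
--
--     # Retryable errors (transient failures)
--     TIMEOUT = "timeout"
--     USER_OFFLINE = "user_offline"
--     TRANSFER_FAILED = "transfer_failed"
--     QUEUE_TIMEOUT = "queue_timeout"
--     CONNECTION_ERROR = "connection_error"
--     RATE_LIMITED = "rate_limited"
--     SLSKD_UNAVAILABLE = "slskd_unavailable"
--     UNKNOWN = "unknown"
--
-- def normalize_error_code(raw_error: str | None) -> str:
--     """Normalize various error messages to standard error codes.
--
--     Hey future me - slskd returns various error strings that we need to map
--     to our standard codes. This handles common variations.
--
--     Args:
--         raw_error: Raw error string from slskd or other source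
--
--     Returns:
--         Normalized DownloadErrorCode value (as string)
--     """
--     if raw_error is None:
--         return DownloadErrorCode.UNKNOWN
--
--     # Normalize to lowercase for comparison
--     error_lower = raw_error.lower()
--
--     # Map common error patterns to codes
--     if any(x in error_lower for x in ["file not found", "not found", "does not exist"]):
--         return DownloadErrorCode.FILE_NOT_FOUND
--
--     if any(x in error_lower for x in ["blocked", "banned", "denied"]):
--         return DownloadErrorCode.USER_BLOCKED
--
--     if any(x in error_lower for x in ["corrupt", "invalid", "bad file", "malformed"]):
--         return DownloadErrorCode.INVALID_FILE
--
--     if any(x in error_lower for x in ["too small", "zero bytes", "empty file"]):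
--         return DownloadErrorCode.FILE_TOO_SMALL
--
--     if any(x in error_lower for x in ["timeout", "timed out"]):
--         return DownloadErrorCode.TIMEOUT
--
--     if any(x in error_lower for x in ["offline", "not online", "unavailable"]):
--         return DownloadErrorCode.USER_OFFLINE
--
--     if any(x in error_lower for x in ["transfer failed", "transfer error", "aborted"]):
--         return DownloadErrorCode.TRANSFER_FAILED
--
--     if any(x in error_lower for x in ["queue", "queued too long"]):
--         return DownloadErrorCode.QUEUE_TIMEOUT
--
--     if any(x in error_lower for x in ["connection", "connect", "network"]):
--         return DownloadErrorCode.CONNECTION_ERROR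
--
--     if any(x in error_lower for x in ["rate limit", "too many"]):
--         return DownloadErrorCode.RATE_LIMITED
--
--     if any(x in error_lower for x in ["slskd", "service unavailable", "503"]):
--         return DownloadErrorCode.SLSKD_UNAVAILABLE
--
--     # Default to unknown
--     return DownloadErrorCode.UNKNOWN
-- ===== SOURCE B (Python) =====
-- from enum import StrEnum
--
-- class DownloadErrorCode(StrEnum):
--     FILE_NOT_FOUND = "file_not_found"
--     USER_BLOCKED = "user_blocked"
--     INVALID_FILE = "invalid_file"
--     FILE_TOO_SMALL = "file_too_small"
--     TIMEOUT = "timeout"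
--     USER_OFFLINE = "user_offline"
--     TRANSFER_FAILED = "transfer_failed"
--     QUEUE_TIMEOUT = "queue_timeout"
--     CONNECTION_ERROR = "connection_error"
--     RATE_LIMITED = "rate_limited"
--     SLSKD_UNAVAILABLE = "slskd_unavailable"
--     UNKNOWN = "unknown"
--
-- # Codes by priority rank; rank 11 is the default.
-- _CODES = [
--     DownloadErrorCode.FILE_NOT_FOUND,
--     DownloadErrorCode.USER_BLOCKED,
--     DownloadErrorCode.INVALID_FILE,
--     DownloadErrorCode.FILE_TOO_SMALL,
--     DownloadErrorCode.TIMEOUT,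
--     DownloadErrorCode.USER_OFFLINE,
--     DownloadErrorCode.TRANSFER_FAILED,
--     DownloadErrorCode.QUEUE_TIMEOUT,
--     DownloadErrorCode.CONNECTION_ERROR,
--     DownloadErrorCode.RATE_LIMITED,
--     DownloadErrorCode.SLSKD_UNAVAILABLE,
--     DownloadErrorCode.UNKNOWN,
-- ]
--
-- # Flat (pattern, priority rank) pairs, kept in ALPHABETICAL order of pattern:
-- # the scan below is a pure min-reduction, so the list order is irrelevant.
-- _FLAT = [
--     ("503", 10),
--     ("aborted", 6),
--     ("bad file", 2),
--     ("banned", 1),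
--     ("blocked", 1),
--     ("connect", 8),
--     ("connection", 8),
--     ("corrupt", 2),
--     ("denied", 1),
--     ("does not exist", 0),
--     ("empty file", 3),
--     ("file not found", 0),
--     ("invalid", 2),
--     ("malformed", 2),
--     ("network", 8),
--     ("not found", 0),
--     ("not online", 5),
--     ("offline", 5),
--     ("queue", 7),
--     ("queued too long", 7),
--     ("rate limit", 9),
--     ("service unavailable", 10),
--     ("slskd", 10),
--     ("timed out", 4),
--     ("timeout", 4),
--     ("too many", 9),
--     ("too small", 3),
--     ("transfer error", 6),
--     ("transfer failed", 6),
--     ("unavailable", 5),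
--     ("zero bytes", 3),
-- ]
--
-- def normalize_error_code(raw_error: str | None) -> str:
--     """Full scan over every pattern, keeping the minimum priority rank matched."""
--     if raw_error is None:
--         return DownloadErrorCode.UNKNOWN
--     error_lower = raw_error.lower()
--     best = len(_CODES) - 1
--     for pattern, rank in _FLAT:
--         if pattern in error_lower:
--             best = min(best, rank)
--     return _CODES[best]
-- ===== Notes on version B (the rewrite author's own statement) =====
-- stated objective: alternative
-- what changed: Replaces the eleven-branch first-match if-chain with a single full min-reduction scan over a flat, alphabetically ordered (pattern, priority-rank) list, returning the code of the minimum rank matched (order-independent, proved equal via a permutation argument).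
import Mathlib
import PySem

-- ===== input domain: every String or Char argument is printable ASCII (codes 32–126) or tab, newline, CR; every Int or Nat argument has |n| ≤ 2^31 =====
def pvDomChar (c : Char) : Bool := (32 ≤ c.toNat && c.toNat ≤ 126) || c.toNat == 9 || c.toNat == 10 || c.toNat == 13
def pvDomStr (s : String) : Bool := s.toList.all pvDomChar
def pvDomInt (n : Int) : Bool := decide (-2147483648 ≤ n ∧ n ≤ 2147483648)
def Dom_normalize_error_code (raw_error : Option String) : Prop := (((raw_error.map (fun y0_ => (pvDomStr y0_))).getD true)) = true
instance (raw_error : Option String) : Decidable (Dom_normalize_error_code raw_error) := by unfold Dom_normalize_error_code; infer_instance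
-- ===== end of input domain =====

-- B replaces A's priority if-chain by a full min-reduction scan over a flat, alphabetically
-- ordered (pattern, rank) list; objective: alternative (order-independent data-driven scan).

-- ===== PORT A =====
def normalize_error_code (raw_error : Option String) : String :=
  match raw_error with
  | none => "unknown"
  | some raw =>
    let error_lower := PySem.Str.lower raw
    if ["file not found", "not found", "does not exist"].any (fun x => PySem.Str.isIn x error_lower) then "file_not_found"
    else if ["blocked", "banned", "denied"].any (fun x => PySem.Str.isIn x error_lower) then "user_blocked"
    else if ["corrupt", "invalid", "bad file", "malformed"].any (fun x => PySem.Str.isIn x error_lower) then "invalid_file"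
    else if ["too small", "zero bytes", "empty file"].any (fun x => PySem.Str.isIn x error_lower) then "file_too_small"
    else if ["timeout", "timed out"].any (fun x => PySem.Str.isIn x error_lower) then "timeout"
    else if ["offline", "not online", "unavailable"].any (fun x => PySem.Str.isIn x error_lower) then "user_offline"
    else if ["transfer failed", "transfer error", "aborted"].any (fun x => PySem.Str.isIn x error_lower) then "transfer_failed"
    else if ["queue", "queued too long"].any (fun x => PySem.Str.isIn x error_lower) then "queue_timeout"
    else if ["connection", "connect", "network"].any (fun x => PySem.Str.isIn x error_lower) then "connection_error"
    else if ["rate limit", "too many"].any (fun x => PySem.Str.isIn x error_lower) then "rate_limited"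
    else if ["slskd", "service unavailable", "503"].any (fun x => PySem.Str.isIn x error_lower) then "slskd_unavailable"
    else "unknown"

-- ===== PORT B =====
-- codes by priority rank; rank 11 is the default "unknown"
def codesList : List String :=
  ["file_not_found", "user_blocked", "invalid_file", "file_too_small", "timeout",
   "user_offline", "transfer_failed", "queue_timeout", "connection_error",
   "rate_limited", "slskd_unavailable", "unknown"]

-- flat (pattern, rank) pairs in ALPHABETICAL order of pattern (Source B's _FLAT)
def flatPatterns : List (String × Nat) :=
  [("503", 10), ("aborted", 6), ("bad file", 2), ("banned", 1), ("blocked", 1),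
   ("connect", 8), ("connection", 8), ("corrupt", 2), ("denied", 1),
   ("does not exist", 0), ("empty file", 3), ("file not found", 0), ("invalid", 2),
   ("malformed", 2), ("network", 8), ("not found", 0), ("not online", 5),
   ("offline", 5), ("queue", 7), ("queued too long", 7), ("rate limit", 9),
   ("service unavailable", 10), ("slskd", 10), ("timed out", 4), ("timeout", 4),
   ("too many", 9), ("too small", 3), ("transfer error", 6), ("transfer failed", 6),
   ("unavailable", 5), ("zero bytes", 3)]

def normalize_error_code_alt (raw_error : Option String) : String :=
  match raw_error with
  | none => "unknown"
  | some raw =>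
    let error_lower := PySem.Str.lower raw
    let best := flatPatterns.foldl
      (fun best pr => if PySem.Str.isIn pr.1 error_lower then min best pr.2 else best)
      (codesList.length - 1)
    codesList.getD best ""

-- ===== PRECONDITION & SPEC =====
def Spec_normalize_error_code (raw_error : Option String) (out : String) : Prop := out = normalize_error_code_alt raw_error
instance (raw_error : Option String) (out : String) : Decidable (Spec_normalize_error_code raw_error out) := by unfold Spec_normalize_error_code; infer_instance

-- ===== CLAIM =====
def Claim_equal_normalize_error_code : Prop := ∀ (raw_error : Option String), Dom_normalize_error_code raw_error → Spec_normalize_error_code raw_error (normalize_error_code raw_error)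

-- ===== LEMMAS AND PROOFS =====

-- the same flat pairs reordered by rank (group order of A's chain)
def flatByRank : List (String × Nat) :=
  [("file not found", 0), ("not found", 0), ("does not exist", 0),
   ("blocked", 1), ("banned", 1), ("denied", 1),
   ("corrupt", 2), ("invalid", 2), ("bad file", 2), ("malformed", 2),
   ("too small", 3), ("zero bytes", 3), ("empty file", 3),
   ("timeout", 4), ("timed out", 4),
   ("offline", 5), ("not online", 5), ("unavailable", 5),
   ("transfer failed", 6), ("transfer error", 6), ("aborted", 6),
   ("queue", 7), ("queued too long", 7),
   ("connection", 8), ("connect", 8), ("network", 8),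
   ("rate limit", 9), ("too many", 9),
   ("slskd", 10), ("service unavailable", 10), ("503", 10)]

lemma flat_perm : flatPatterns.Perm flatByRank := by decide

-- one min-step, abstracted on the match boolean
def gstep (g : Bool) (i a : Nat) : Nat := if g then min a i else a

lemma gstep_merge (g h : Bool) (i a : Nat) :
    gstep h i (gstep g i a) = gstep (g || h) i a := by
  cases g <;> cases h <;> simp [gstep]

-- the whole comparison, as a function of the 11 group booleans: finite, so `decide`
lemma chain_eq_fold (g0 g1 g2 g3 g4 g5 g6 g7 g8 g9 g10 : Bool) :
    (if g0 then "file_not_found"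
     else if g1 then "user_blocked"
     else if g2 then "invalid_file"
     else if g3 then "file_too_small"
     else if g4 then "timeout"
     else if g5 then "user_offline"
     else if g6 then "transfer_failed"
     else if g7 then "queue_timeout"
     else if g8 then "connection_error"
     else if g9 then "rate_limited"
     else if g10 then "slskd_unavailable"
     else "unknown")
    = codesList.getD
        (gstep g10 10 (gstep g9 9 (gstep g8 8 (gstep g7 7 (gstep g6 6 (gstep g5 5
          (gstep g4 4 (gstep g3 3 (gstep g2 2 (gstep g1 1 (gstep g0 0 11))))))))))) "" := by
  cases g0 <;> cases g1 <;> cases g2 <;> cases g3 <;> cases g4 <;> cases g5 <;>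
    cases g6 <;> cases g7 <;> cases g8 <;> cases g9 <;> cases g10 <;> rfl

lemma step_comm (s : String) :
    ∀ x ∈ flatPatterns, ∀ y ∈ flatPatterns, ∀ z : Nat,
      (if PySem.Str.isIn y.1 s then min (if PySem.Str.isIn x.1 s then min z x.2 else z) y.2
       else if PySem.Str.isIn x.1 s then min z x.2 else z)
      = (if PySem.Str.isIn x.1 s then min (if PySem.Str.isIn y.1 s then min z y.2 else z) x.2
         else if PySem.Str.isIn y.1 s then min z y.2 else z) := by
  intro x _ y _ z
  split_ifs <;> first | rfl | exact min_right_comm _ _ _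

lemma step_as_gstep (s p : String) (r a : Nat) :
    (if PySem.Str.isIn p s then min a r else a) = gstep (PySem.Str.isIn p s) r a := rfl

lemma alt_some (raw : String) :
    normalize_error_code_alt (some raw)
      = codesList.getD
          (flatByRank.foldl
            (fun best pr => if PySem.Str.isIn pr.1 (PySem.Str.lower raw) then min best pr.2 else best)
            11) "" := by
  unfold normalize_error_code_alt
  exact congrArg (fun n => codesList.getD n "") (flat_perm.foldl_eq' (step_comm _) 11)

-- ===== VERDICT =====
theorem normalize_error_code_spec : Claim_equal_normalize_error_code := by
  intro raw_error _
  unfold Spec_normalize_error_code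
  cases raw_error with
  | none => rfl
  | some raw =>
    rw [alt_some]
    unfold normalize_error_code
    simp only [flatByRank, List.foldl_cons, List.foldl_nil, step_as_gstep, gstep_merge,
      List.any_cons, List.any_nil, Bool.or_false, Bool.or_assoc]
    exact chain_eq_fold _ _ _ _ _ _ _ _ _ _ _
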